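-- pv_equiv track=rewrite | github.com/AlexeyTerleev/labs-sem4 | AOIS/lab3/src/Glue.py | glue
-- ===== SOURCE A (Python) =====
-- def glue(first_constituent, second_constituent):
--     out = []
--     count = 0
--     for i in range(len(first_constituent)):
--         if first_constituent[i] != second_constituent[i]:
--             count += 1
--             out.append(2)
--         else:
--             out.append(first_constituent[i])
--
--     return out if count == 1 else None
-- ===== SOURCE B (Python) =====
-- def glue(first_constituent, second_constituent):
--     n = len(first_constituent)
--     i = 0
--     while i < n and first_constituent[i] == second_constituent[i]:
--         i += 1
--     if i == n:
--         return None
--     if first_constituent[i + 1:] != second_constituent[i + 1:n]: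
--         return None
--     return first_constituent[:i] + [2] + first_constituent[i + 1:]
-- ===== Notes on version B (the rewrite author's own statement) =====
-- stated objective: alternative
-- what changed: B replaces A's count-all-mismatches pass that builds the output element by element with an early-exit search for the first differing index, a wholesale equality comparison of the two remaining suffixes, and a slice-splice [prefix]+[2]+[suffix] construction of the result.
import Mathlib
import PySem

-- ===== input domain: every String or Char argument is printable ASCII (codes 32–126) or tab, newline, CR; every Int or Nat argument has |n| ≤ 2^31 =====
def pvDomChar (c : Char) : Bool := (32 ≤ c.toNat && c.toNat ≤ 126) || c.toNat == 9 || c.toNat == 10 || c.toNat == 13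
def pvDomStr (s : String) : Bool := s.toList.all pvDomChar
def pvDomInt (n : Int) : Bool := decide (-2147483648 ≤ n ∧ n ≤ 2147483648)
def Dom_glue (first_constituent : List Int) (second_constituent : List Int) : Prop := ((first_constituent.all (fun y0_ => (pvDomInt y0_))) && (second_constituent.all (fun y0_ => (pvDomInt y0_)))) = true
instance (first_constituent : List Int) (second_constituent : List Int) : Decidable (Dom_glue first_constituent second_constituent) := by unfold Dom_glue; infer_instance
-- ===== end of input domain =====

-- B searches for the first differing position with an early-exit loop, then compares
-- the two remaining suffixes wholesale and splices [2] between the surrounding slices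
-- of the first constituent, instead of A's full count-all-mismatches pass that builds
-- the output element by element (objective: alternative decomposition).

-- ===== PORT A =====
-- literal port of A: one pass building `out` and `count`, then the final test
def glue (first_constituent : List Int) (second_constituent : List Int) : Option (List Int) :=
  let st := (PySem.List.pyRange 0 (first_constituent.length : Int) 1).foldl
    (fun (st : List Int × Int) i =>
      if PySem.List.pyGetD first_constituent i 0 ≠ PySem.List.pyGetD second_constituent i 0 then
        (st.1 ++ [2], st.2 + 1)
      else
        (st.1 ++ [PySem.List.pyGetD first_constituent i 0], st.2))
    ([], 0)
  if st.2 = 1 then some st.1 else none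

-- ===== PORT B =====
-- the `while i < n and f[i] == s[i]: i += 1` loop of Source B
def glueFind (f s : List Int) (n : Nat) (i : Nat) : Nat :=
  if i < n ∧ PySem.List.pyGetD f (i : Int) 0 = PySem.List.pyGetD s (i : Int) 0 then
    glueFind f s n (i + 1)
  else i
termination_by n - i
decreasing_by omega

-- port of B: find the first differing index, compare the remaining suffixes, splice
def glue_alt (first_constituent : List Int) (second_constituent : List Int) : Option (List Int) :=
  let n := first_constituent.length
  let i := glueFind first_constituent second_constituent n 0
  if i = n then none
  else if PySem.List.slice first_constituent (some ((i : Int) + 1)) none ≠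
          PySem.List.slice second_constituent (some ((i : Int) + 1)) (some (n : Int)) then none
  else some (PySem.List.slice first_constituent none (some (i : Int)) ++ [2] ++
             PySem.List.slice first_constituent (some ((i : Int) + 1)) none)

-- ===== PRECONDITION & SPEC =====
-- A (and B alike) raises IndexError when second_constituent is shorter than first_constituent
def Pre_glue (first_constituent : List Int) (second_constituent : List Int) : Prop :=
  first_constituent.length ≤ second_constituent.length
instance (first_constituent : List Int) (second_constituent : List Int) : Decidable (Pre_glue first_constituent second_constituent) := by unfold Pre_glue; infer_instance
def pvWitness_glue : List Int × List Int := ([0, 1], [1, 1])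

def Spec_glue (first_constituent : List Int) (second_constituent : List Int) (out : Option (List Int)) : Prop := out = glue_alt first_constituent second_constituent
instance (first_constituent : List Int) (second_constituent : List Int) (out : Option (List Int)) : Decidable (Spec_glue first_constituent second_constituent out) := by unfold Spec_glue; infer_instance

-- ===== CLAIM (what is proved, stated in full; the proofs are below) =====
def Claim_equal_glue : Prop := ∀ (first_constituent : List Int) (second_constituent : List Int), Dom_glue first_constituent second_constituent → Pre_glue first_constituent second_constituent → Spec_glue first_constituent second_constituent (glue first_constituent second_constituent)

-- ===== LEMMAS AND PROOFS =====

-- A's loop: the accumulated output is a map over the index list, the count is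
-- the length of the filtered index list.
theorem glue_foldA (f s : List Int) (l : List Int) (acc : List Int) (c : Int) :
    l.foldl
      (fun (st : List Int × Int) i =>
        if PySem.List.pyGetD f i 0 ≠ PySem.List.pyGetD s i 0 then
          (st.1 ++ [2], st.2 + 1)
        else
          (st.1 ++ [PySem.List.pyGetD f i 0], st.2)) (acc, c)
    = (acc ++ l.map (fun i => if PySem.List.pyGetD f i 0 ≠ PySem.List.pyGetD s i 0 then 2 else PySem.List.pyGetD f i 0),
       c + ((l.filter (fun i => PySem.List.pyGetD f i 0 ≠ PySem.List.pyGetD s i 0)).length : Int)) := by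
  induction l generalizing acc c with
  | nil => simp
  | cons x xs ih =>
    by_cases h : PySem.List.pyGetD f x 0 ≠ PySem.List.pyGetD s x 0
    · simp only [List.foldl_cons, if_pos h, ih, List.map_cons, List.filter_cons,
        decide_eq_true h]
      rw [Prod.ext_iff]
      exact ⟨by simp, by simp; ring⟩
    · simp only [List.foldl_cons, if_neg h, ih, List.map_cons, List.filter_cons,
        decide_eq_false h]
      rw [Prod.ext_iff]
      exact ⟨by simp, rfl⟩

-- when the differing indices over range n are exactly [k], mapping A's
-- element rule over all indices is the same as setting position k to 2
theorem glue_map_eq_set (f : List Int) (p : Nat → Prop) [DecidablePred p] (k : Nat)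
    (hf : (List.range f.length).filter (fun j => p j) = [k]) :
    (List.range f.length).map (fun j => if p j then 2 else f.getD j 0) = f.set k 2 := by
  have hk : k ∈ (List.range f.length).filter (fun j => p j) := by rw [hf]; simp
  have hkn : k < f.length := by simpa using List.mem_of_mem_filter hk
  have hpk : p k := by simpa using (List.of_mem_filter hk)
  apply List.ext_getElem
  · simp
  · intro j hj hj'
    have hjn : j < f.length := by simpa using hj
    have hjr : j ∈ List.range f.length := by simpa using hjn
    by_cases hjk : j = k
    · subst hjk
      simp [hpk]
    · have hnp : ¬ p j := by
        intro hpj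
        have : j ∈ (List.range f.length).filter (fun j => p j) :=
          List.mem_filter.2 ⟨hjr, by simpa using hpj⟩
        rw [hf] at this; simp at this; exact hjk this
      simp [hnp, List.getElem_set, List.getD_eq_getElem?_getD,
        List.getElem?_eq_getElem hjn]
      intro h; exact absurd h.symm hjk

-- B's while loop: it stops at the first index in [i, n) where f and s differ
-- (or at n); stated as the three facts the main proof needs.
theorem glueFind_spec (f s : List Int) (n : Nat) : ∀ i, i ≤ n →
    i ≤ glueFind f s n i ∧ glueFind f s n i ≤ n ∧
    (∀ j, i ≤ j → j < glueFind f s n i → f.getD j 0 = s.getD j 0) ∧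
    (glueFind f s n i < n → f.getD (glueFind f s n i) 0 ≠ s.getD (glueFind f s n i) 0) := by
  intro i hi
  induction hgen : n - i generalizing i with
  | zero =>
    have hin : i = n := by omega
    rw [glueFind]
    have : ¬ (i < n ∧ PySem.List.pyGetD f (i : Int) 0 = PySem.List.pyGetD s (i : Int) 0) := by
      intro h; omega
    rw [if_neg this]
    exact ⟨le_refl _, by omega, fun j h1 h2 => by omega, fun h => by omega⟩
  | succ k ih =>
    rw [glueFind]
    by_cases h : i < n ∧ PySem.List.pyGetD f (i : Int) 0 = PySem.List.pyGetD s (i : Int) 0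
    · rw [if_pos h]
      obtain ⟨hlt, heq⟩ := h
      have heq' : f.getD i 0 = s.getD i 0 := by simpa using heq
      obtain ⟨h1, h2, h3, h4⟩ := ih (i + 1) (by omega) (by omega)
      refine ⟨by omega, h2, ?_, h4⟩
      intro j hj1 hj2
      rcases Nat.eq_or_lt_of_le hj1 with rfl | hj1'
      · exact heq'
      · exact h3 j hj1' hj2
    · rw [if_neg h]
      refine ⟨le_refl _, hi, fun j h1 h2 => by omega, fun hlt => ?_⟩
      intro heq
      exact h ⟨hlt, by simpa using heq⟩

-- suffix-slice equality ⟺ element-wise equality beyond position r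
theorem glue_suffix_iff (f s : List Int) (r : Nat) (hlen : f.length ≤ s.length)
    (hr : r < f.length) :
    f.drop (r + 1) = (s.drop (r + 1)).take (f.length - (r + 1)) ↔
    ∀ j, r + 1 ≤ j → j < f.length → f.getD j 0 = s.getD j 0 := by
  constructor
  · intro h j hj1 hj2
    have hjs : j < s.length := by omega
    have h1 : (f.drop (r+1))[j-(r+1)]? = ((s.drop (r+1)).take (f.length-(r+1)))[j-(r+1)]? := by
      rw [h]
    have hsmall : j - (r+1) < f.length - (r+1) := by omega
    simp only [List.getElem?_drop, List.getElem?_take_of_lt hsmall] at h1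
    have hje : r + 1 + (j - (r + 1)) = j := by omega
    rw [hje] at h1
    simp only [List.getD_eq_getElem?_getD, h1]
  · intro h
    apply List.ext_getElem
    · simp; omega
    · intro j hj hj'
      have hjf : r + 1 + j < f.length := by simp at hj; omega
      have hjs : r + 1 + j < s.length := by omega
      simp only [List.getElem_take, List.getElem_drop]
      have := h (r + 1 + j) (by omega) hjf
      simp only [List.getD_eq_getElem?_getD, List.getElem?_eq_getElem hjf,
        List.getElem?_eq_getElem hjs, Option.getD_some] at this
      exact this

-- ===== VERDICT (by name: the statement is the Claim_ definition above) =====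
theorem glue_spec : Claim_equal_glue := by
  intro f s _ hpre
  unfold Spec_glue glue glue_alt
  rw [PySem.List.pyRange_zero_natCast, glue_foldA]
  simp only [List.filter_map, List.map_map, Function.comp_def, PySem.List.pyGetD_natCast,
    List.length_map, zero_add, List.nil_append]
  set n := f.length with hn
  obtain ⟨-, hrle, hpref, hstop⟩ := glueFind_spec f s n 0 (by omega)
  set r := glueFind f s n 0 with hrdef
  by_cases hrn : r = n
  · -- no differing position at all: both return none
    have hnil : (List.range n).filter (fun k => decide (f.getD k 0 ≠ s.getD k 0)) = [] := by
      rw [List.filter_eq_nil_iff]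
      intro j hj
      simp only [List.mem_range] at hj
      exact fun hc => (of_decide_eq_true hc) (hpref j (Nat.zero_le _) (by omega))
    rw [hnil, if_pos hrn, if_neg (by norm_num)]
  · have hrlt : r < n := lt_of_le_of_ne hrle hrn
    have hPr : f.getD r 0 ≠ s.getD r 0 := hstop hrlt
    -- decompose the filtered index list around the first difference r
    have hsplit : (List.range n).filter (fun k => decide (f.getD k 0 ≠ s.getD k 0)) =
        r :: ((List.range (n - (r + 1))).filter
          (fun j => decide (f.getD (r + 1 + j) 0 ≠ s.getD (r + 1 + j) 0))).map (r + 1 + ·) := by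
      conv_lhs => rw [show n = (r + 1) + (n - (r + 1)) by omega]
      rw [List.range_add, List.filter_append, List.range_succ, List.filter_append]
      have h1 : (List.range r).filter (fun k => decide (f.getD k 0 ≠ s.getD k 0)) = [] := by
        rw [List.filter_eq_nil_iff]
        intro j hj
        simp only [List.mem_range] at hj
        exact fun hc => (of_decide_eq_true hc) (hpref j (Nat.zero_le _) hj)
      rw [h1, List.filter_map]
      have hdr : decide (f.getD r 0 ≠ s.getD r 0) = true := decide_eq_true hPr
      simp only [List.filter_cons, List.filter_nil, hdr, if_true, List.nil_append,
        List.cons_append, Function.comp_def]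
    -- B's slice expressions in drop/take form
    have hcast1 : (r : Int) + 1 = ((r + 1 : Nat) : Int) := by push_cast; ring
    have hsl1 : PySem.List.slice f (some ((r : Int) + 1)) none = f.drop (r + 1) := by
      rw [hcast1, PySem.List.slice_from_natCast]
    have hsl2 : PySem.List.slice s (some ((r : Int) + 1)) (some (n : Int)) =
        (s.drop (r + 1)).take (n - (r + 1)) := by
      rw [hcast1, PySem.List.slice_natCast]
    have hsl3 : PySem.List.slice f none (some (r : Int)) = f.take r := by
      rw [PySem.List.slice_to_natCast]
    by_cases hsuf : f.drop (r + 1) = (s.drop (r + 1)).take (n - (r + 1))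
    · -- the suffixes agree: exactly one difference, both return the spliced list
      have htail : ∀ j, r + 1 ≤ j → j < n → f.getD j 0 = s.getD j 0 :=
        (glue_suffix_iff f s r hpre hrlt).1 hsuf
      have hrest : (List.range (n - (r + 1))).filter
          (fun j => decide (f.getD (r + 1 + j) 0 ≠ s.getD (r + 1 + j) 0)) = [] := by
        rw [List.filter_eq_nil_iff]
        intro j hj
        simp only [List.mem_range] at hj
        exact fun hc => (of_decide_eq_true hc) (htail (r + 1 + j) (by omega) (by omega))
      have hone : (List.range n).filter (fun k => decide (f.getD k 0 ≠ s.getD k 0)) = [r] := by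
        rw [hsplit, hrest]; rfl
      rw [hone, hsl1, hsl2, hsl3, if_neg hrn, if_neg (not_not_intro hsuf), if_pos (by norm_num)]
      have hmap := glue_map_eq_set f (fun j => f.getD j 0 ≠ s.getD j 0) r
        (by rw [← hn]; exact hone)
      rw [hn, hmap, List.set_eq_take_cons_drop 2 (by omega : r < f.length)]
      simp
    · -- a second difference exists: both return none
      have hrest : ((List.range (n - (r + 1))).filter
          (fun j => decide (f.getD (r + 1 + j) 0 ≠ s.getD (r + 1 + j) 0))) ≠ [] := by
        intro hnilr
        apply hsuf
        apply (glue_suffix_iff f s r hpre hrlt).2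
        intro j hj1 hj2
        by_contra hne
        have : j - (r + 1) ∈ (List.range (n - (r + 1))).filter
            (fun j => decide (f.getD (r + 1 + j) 0 ≠ s.getD (r + 1 + j) 0)) := by
          rw [List.mem_filter]
          constructor
          · simp only [List.mem_range]; omega
          · have hje : r + 1 + (j - (r + 1)) = j := by omega
            rw [hje]; exact decide_eq_true hne
        rw [hnilr] at this
        simp at this
      have hpos := List.length_pos_of_ne_nil hrest
      rw [hsplit, hsl1, hsl2, if_neg hrn, if_pos hsuf,
        if_neg (by simp only [List.length_cons, List.length_map]; push_cast; omega)]
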